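-- pv_equiv track=rewrite | github.com/t00n/TreeCount | treecount/views.py | compute_balance_solution
-- ===== SOURCE A (Python) =====
-- from collections import defaultdict
--
-- def compute_balance_solution(balance):
--     def get_negative(balance):
--         for k, v in balance.items():
--             if v < 0:
--                 return k
--         return None
--     def get_positive(balance):
--         for k, v in balance.items():
--             if v > 0:
--                 return k
--         return None
--     solution = defaultdict(lambda: defaultdict(lambda: 0))
--     while True:
--         cred = get_positive(balance)
--         deb = get_negative(balance)
--         if cred == None or deb == None:
--             break
--         amount = min(-balance[deb], balance[cred])
--         solution[deb][cred] += amount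
--         balance[deb] += amount
--         balance[cred] -= amount
--     return {k: dict(v) for k, v in solution.items()}
-- ===== SOURCE B (Python) =====
-- def compute_balance_solution(balance):
--     debtors = [(k, -v) for k, v in balance.items() if v < 0]
--     creditors = [(k, v) for k, v in balance.items() if v > 0]
--     solution = {}
--     i = j = 0
--     while i < len(debtors) and j < len(creditors):
--         dk, dv = debtors[i]
--         ck, cv = creditors[j]
--         a = dv if dv < cv else cv
--         solution.setdefault(dk, {})[ck] = a
--         if dv <= cv:
--             i += 1
--         else:
--             debtors[i] = (dk, dv - a)
--         if cv <= dv: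
--             j += 1
--         else:
--             creditors[j] = (ck, cv - a)
--     return solution
-- ===== Notes on version B (the rewrite author's own statement) =====
-- stated objective: alternative
-- what changed: A repeatedly rescans the dict from the start for the first creditor/debtor and re-looks-up balances every iteration; B builds the debtor and creditor lists once and settles them in a single two-pointer sweep in dict order.
import Mathlib
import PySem

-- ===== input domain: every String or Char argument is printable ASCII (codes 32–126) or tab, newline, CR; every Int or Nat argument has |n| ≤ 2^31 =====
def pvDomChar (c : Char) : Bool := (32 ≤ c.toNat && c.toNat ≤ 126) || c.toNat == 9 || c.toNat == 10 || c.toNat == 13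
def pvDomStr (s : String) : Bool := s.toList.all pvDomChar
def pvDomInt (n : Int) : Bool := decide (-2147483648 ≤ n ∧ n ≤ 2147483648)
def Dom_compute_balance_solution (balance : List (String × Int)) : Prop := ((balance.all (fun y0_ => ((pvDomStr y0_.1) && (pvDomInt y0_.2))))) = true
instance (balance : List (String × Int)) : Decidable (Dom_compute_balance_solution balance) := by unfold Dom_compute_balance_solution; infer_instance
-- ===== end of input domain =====

-- B replaces A's rescan-the-dict-from-the-start settlement loop by a single two-pointer sweep over
-- the debtor and creditor lists taken in dict order; same return value. Python A mutates its
-- `balance` argument (zeroes it out); B does not — the equivalence proved here is about the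
-- RETURN value only.

-- ===== PORT A =====
-- inner helper get_negative: first key with a negative value
def pvGetNegative : List (String × Int) → Option String
  | [] => none
  | (k, v) :: rest => if v < 0 then some k else pvGetNegative rest

-- inner helper get_positive: first key with a positive value
def pvGetPositive : List (String × Int) → Option String
  | [] => none
  | (k, v) :: rest => if 0 < v then some k else pvGetPositive rest

-- balance[k]; where A uses it the key is always present (the default 0 is unreachable)
def pvLookup : List (String × Int) → String → Int
  | [], _ => 0
  | (k, v) :: rest, x => if k = x then v else pvLookup rest x

-- balance[k] += δ  (in-place value update of an existing key, position kept)
def pvAddAt (l : List (String × Int)) (k : String) (δ : Int) : List (String × Int) :=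
  l.map (fun p => if p.1 = k then (p.1, p.2 + δ) else p)

-- solution[deb][cred] += amount, inner defaultdict(int) level
def pvInnerAdd : List (String × Int) → String → Int → List (String × Int)
  | [], c, a => [(c, a)]
  | (k, v) :: rest, c, a => if k = c then (k, v + a) :: rest else (k, v) :: pvInnerAdd rest c a

-- solution[deb][cred] += amount, outer defaultdict level (new keys append, as in Python)
def pvSolAdd : List (String × List (String × Int)) → String → String → Int →
    List (String × List (String × Int))
  | [], d, c, a => [(d, [(c, a)])]
  | (k, inner) :: rest, d, c, a =>
      if k = d then (k, pvInnerAdd inner c a) :: rest else (k, inner) :: pvSolAdd rest d c a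

-- A's `while True` loop; every iteration moves ≥ 1 unit and zeroes an entry, so the fuel
-- supplied in compute_balance_solution is never exhausted (proved in the lemmas below)
def pvLoopA : Nat → List (String × Int) → List (String × List (String × Int)) →
    List (String × List (String × Int))
  | 0, _, sol => sol
  | fuel + 1, bal, sol =>
    match pvGetPositive bal, pvGetNegative bal with
    | some cred, some deb =>
        let amount := min (-(pvLookup bal deb)) (pvLookup bal cred)
        pvLoopA fuel (pvAddAt (pvAddAt bal deb amount) cred (-amount)) (pvSolAdd sol deb cred amount)
    | _, _ => sol

def compute_balance_solution (balance : List (String × Int)) : List (String × List (String × Int)) :=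
  let bal := (PySem.Dict.ofList balance).items   -- the dict A receives
  pvLoopA (2 * bal.length + 1) bal []

-- ===== PORT B =====
-- [(k, -v) for k, v in balance.items() if v < 0]
def pvNegs (l : List (String × Int)) : List (String × Int) :=
  (l.filter (fun p => p.2 < 0)).map (fun p => (p.1, -p.2))

-- [(k, v) for k, v in balance.items() if v > 0]
def pvPoss (l : List (String × Int)) : List (String × Int) :=
  l.filter (fun p => 0 < p.2)

-- solution.setdefault(dk, {})[ck] = a, inner dict level
def pvInnerSet : List (String × Int) → String → Int → List (String × Int)
  | [], c, a => [(c, a)]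
  | (k, v) :: rest, c, a => if k = c then (k, a) :: rest else (k, v) :: pvInnerSet rest c a

def pvSolSet : List (String × List (String × Int)) → String → String → Int →
    List (String × List (String × Int))
  | [], d, c, a => [(d, [(c, a)])]
  | (k, inner) :: rest, d, c, a =>
      if k = d then (k, pvInnerSet inner c a) :: rest else (k, inner) :: pvSolSet rest d c a

-- B's while loop; the advancing i/j pointers become consuming the two lists from the front
def pvSweep : List (String × Int) → List (String × Int) → List (String × List (String × Int)) →
    List (String × List (String × Int))
  | [], _, sol => sol
  | _ :: _, [], sol => sol
  | (dk, dv) :: ds, (ck, cv) :: cs, sol =>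
      let a := if dv < cv then dv else cv
      let sol' := pvSolSet sol dk ck a
      if dv ≤ cv then
        (if cv ≤ dv then pvSweep ds cs sol' else pvSweep ds ((ck, cv - a) :: cs) sol')
      else pvSweep ((dk, dv - a) :: ds) cs sol'
  termination_by ds cs _ => ds.length + cs.length
  decreasing_by all_goals (simp only [List.length_cons]; omega)

def compute_balance_solution_alt (balance : List (String × Int)) :
    List (String × List (String × Int)) :=
  let bal := (PySem.Dict.ofList balance).items
  pvSweep (pvNegs bal) (pvPoss bal) []

-- ===== PRECONDITION & SPEC =====
def Spec_compute_balance_solution (balance : List (String × Int)) (out : List (String × List (String × Int))) : Prop := out = compute_balance_solution_alt balance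
instance (balance : List (String × Int)) (out : List (String × List (String × Int))) : Decidable (Spec_compute_balance_solution balance out) := by unfold Spec_compute_balance_solution; infer_instance

-- ===== CLAIM (what is proved, stated in full; the proofs are below) =====
def Claim_equal_compute_balance_solution : Prop := ∀ (balance : List (String × Int)), Dom_compute_balance_solution balance → Spec_compute_balance_solution balance (compute_balance_solution balance)

-- ===== LEMMAS AND PROOFS =====

-- the solution invariant: a still-active debtor's recorded transfers never mention a still-active creditor
def pvInv (ds cs : List (String × Int)) (sol : List (String × List (String × Int))) : Prop :=
  ∀ q ∈ sol, q.1 ∈ ds.map (·.1) → ∀ c ∈ q.2.map (·.1), c ∉ cs.map (·.1)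

lemma pvMemKeys {α β : Type} {l : List (α × β)} {p : α × β} (h : p ∈ l) : p.1 ∈ l.map (·.1) :=
  List.mem_map.mpr ⟨p, h, rfl⟩

lemma pvNegs_cons_neg {k0 : String} {v0 : Int} {t : List (String × Int)} (hv : v0 < 0) :
    pvNegs ((k0, v0) :: t) = (k0, -v0) :: pvNegs t := by
  simp [pvNegs, hv]

lemma pvNegs_cons_nonneg {k0 : String} {v0 : Int} {t : List (String × Int)} (hv : ¬ v0 < 0) :
    pvNegs ((k0, v0) :: t) = pvNegs t := by
  simp [pvNegs, hv]

lemma pvPoss_cons_pos {k0 : String} {v0 : Int} {t : List (String × Int)} (hv : 0 < v0) :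
    pvPoss ((k0, v0) :: t) = (k0, v0) :: pvPoss t := by
  simp [pvPoss, hv]

lemma pvPoss_cons_nonpos {k0 : String} {v0 : Int} {t : List (String × Int)} (hv : ¬ 0 < v0) :
    pvPoss ((k0, v0) :: t) = pvPoss t := by
  simp [pvPoss, hv]

lemma pvGetNegative_eq (l : List (String × Int)) :
    pvGetNegative l = (pvNegs l).head?.map (·.1) := by
  induction l with
  | nil => rfl
  | cons p t ih =>
    obtain ⟨k, v⟩ := p
    by_cases hv : v < 0
    · rw [pvNegs_cons_neg hv]
      simp [pvGetNegative, hv]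
    · rw [pvNegs_cons_nonneg hv]
      simp only [pvGetNegative]
      rw [if_neg hv]
      exact ih

lemma pvGetPositive_eq (l : List (String × Int)) :
    pvGetPositive l = (pvPoss l).head?.map (·.1) := by
  induction l with
  | nil => rfl
  | cons p t ih =>
    obtain ⟨k, v⟩ := p
    by_cases hv : 0 < v
    · rw [pvPoss_cons_pos hv]
      simp [pvGetPositive, hv]
    · rw [pvPoss_cons_nonpos hv]
      simp only [pvGetPositive]
      rw [if_neg hv]
      exact ih

lemma pvLookup_mem : ∀ {l : List (String × Int)} {k : String} {v : Int},
    (l.map (·.1)).Nodup → (k, v) ∈ l → pvLookup l k = v := by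
  intro l
  induction l with
  | nil => intro k v _ h; simp at h
  | cons p t ih =>
    intro k v hnd h
    obtain ⟨k0, v0⟩ := p
    rw [List.map_cons, List.nodup_cons] at hnd
    rcases List.mem_cons.mp h with h1 | h1
    · injection h1 with e1 e2
      subst e1; subst e2
      simp [pvLookup]
    · have hk : ¬ (k0 = k) := by
        intro e
        subst e
        have hm : k0 ∈ t.map (·.1) := pvMemKeys h1
        exact hnd.1 hm
      simp only [pvLookup, if_neg hk]
      exact ih hnd.2 h1

lemma pvAddAt_cons (k0 : String) (v0 : Int) (t : List (String × Int)) (k : String) (δ : Int) :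
    pvAddAt ((k0, v0) :: t) k δ
      = (if k0 = k then (k0, v0 + δ) else (k0, v0)) :: pvAddAt t k δ := rfl

lemma pvAddAt_not_mem : ∀ {l : List (String × Int)} {k : String} (δ : Int),
    k ∉ l.map (·.1) → pvAddAt l k δ = l := by
  intro l
  induction l with
  | nil => intro k δ _; rfl
  | cons p t ih =>
    intro k δ h
    obtain ⟨k0, v0⟩ := p
    simp only [List.map_cons, List.mem_cons] at h
    push_neg at h
    rw [pvAddAt_cons, if_neg (fun e => h.1 e.symm), ih δ h.2]

lemma map_fst_pvAddAt : ∀ (l : List (String × Int)) (k : String) (δ : Int),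
    (pvAddAt l k δ).map (·.1) = l.map (·.1) := by
  intro l
  induction l with
  | nil => intro k δ; rfl
  | cons p t ih =>
    intro k δ
    obtain ⟨k0, v0⟩ := p
    rw [pvAddAt_cons]
    by_cases hp : k0 = k <;> simp [hp, ih k δ]

lemma pvNegs_head {l R : List (String × Int)} {d : String} {a : Int}
    (h : pvNegs l = (d, a) :: R) : (d, -a) ∈ l ∧ 0 < a := by
  have hm : (d, a) ∈ pvNegs l := by rw [h]; exact List.mem_cons_self
  simp only [pvNegs, List.mem_map, List.mem_filter, decide_eq_true_eq] at hm
  obtain ⟨⟨k0, v0⟩, ⟨hmem, hneg⟩, heq⟩ := hm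
  injection heq with e1 e2
  subst e1
  refine ⟨?_, by omega⟩
  have hveq : v0 = -a := by omega
  rwa [hveq] at hmem

lemma pvPoss_head {l R : List (String × Int)} {c : String} {v : Int}
    (h : pvPoss l = (c, v) :: R) : (c, v) ∈ l ∧ 0 < v := by
  have hm : (c, v) ∈ pvPoss l := by rw [h]; exact List.mem_cons_self
  simp only [pvPoss, List.mem_filter, decide_eq_true_eq] at hm
  exact ⟨hm.1, hm.2⟩

lemma pvStep_neg : ∀ (l : List (String × Int)) (d : String) (a : Int)
    (R : List (String × Int)) (δ : Int),
    (l.map (·.1)).Nodup → pvNegs l = (d, a) :: R → δ ≤ a →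
    pvNegs (pvAddAt l d δ) = (if δ < a then [(d, a - δ)] else []) ++ R
      ∧ pvPoss (pvAddAt l d δ) = pvPoss l := by
  intro l
  induction l with
  | nil => intro d a R δ _ h _; simp [pvNegs] at h
  | cons p t ih =>
    intro d a R δ hnd h hδ
    obtain ⟨k0, v0⟩ := p
    rw [List.map_cons, List.nodup_cons] at hnd
    by_cases hv : v0 < 0
    · rw [pvNegs_cons_neg hv] at h
      injection h with e1 e2
      injection e1 with e1a e1b
      subst e1a
      subst e2
      have ht : pvAddAt t k0 δ = t := pvAddAt_not_mem δ hnd.1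
      rw [pvAddAt_cons, if_pos rfl, ht]
      constructor
      · by_cases h2 : δ < a
        · rw [pvNegs_cons_neg (by omega : v0 + δ < 0), if_pos h2]
          have e : -(v0 + δ) = a - δ := by omega
          rw [e, List.singleton_append]
        · rw [pvNegs_cons_nonneg (by omega), if_neg h2, List.nil_append]
      · rw [pvPoss_cons_nonpos (by omega), pvPoss_cons_nonpos (by omega)]
    · rw [pvNegs_cons_nonneg hv] at h
      have hd : d ≠ k0 := by
        intro e
        have hm : d ∈ t.map (·.1) := pvMemKeys (pvNegs_head h).1
        rw [e] at hm
        exact hnd.1 hm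
      have hstep := ih d a R δ hnd.2 h hδ
      rw [pvAddAt_cons, if_neg (fun e => hd e.symm)]
      constructor
      · rw [pvNegs_cons_nonneg hv, hstep.1]
      · by_cases hp : 0 < v0
        · rw [pvPoss_cons_pos hp, pvPoss_cons_pos hp, hstep.2]
        · rw [pvPoss_cons_nonpos hp, pvPoss_cons_nonpos hp, hstep.2]

lemma pvStep_pos : ∀ (l : List (String × Int)) (c : String) (v : Int)
    (R : List (String × Int)) (δ : Int),
    (l.map (·.1)).Nodup → pvPoss l = (c, v) :: R → 0 ≤ v + δ →
    pvPoss (pvAddAt l c δ) = (if 0 < v + δ then [(c, v + δ)] else []) ++ R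
      ∧ pvNegs (pvAddAt l c δ) = pvNegs l := by
  intro l
  induction l with
  | nil => intro c v R δ _ h _; simp [pvPoss] at h
  | cons p t ih =>
    intro c v R δ hnd h hδ
    obtain ⟨k0, v0⟩ := p
    rw [List.map_cons, List.nodup_cons] at hnd
    by_cases hv : 0 < v0
    · rw [pvPoss_cons_pos hv] at h
      injection h with e1 e2
      injection e1 with e1a e1b
      subst e1a
      subst e1b
      subst e2
      have ht : pvAddAt t k0 δ = t := pvAddAt_not_mem δ hnd.1
      rw [pvAddAt_cons, if_pos rfl, ht]
      constructor
      · by_cases h2 : 0 < v0 + δ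
        · rw [pvPoss_cons_pos h2, if_pos h2, List.singleton_append]
        · rw [pvPoss_cons_nonpos h2, if_neg h2, List.nil_append]
      · rw [pvNegs_cons_nonneg (by omega), pvNegs_cons_nonneg (by omega)]
    · rw [pvPoss_cons_nonpos hv] at h
      have hc : c ≠ k0 := by
        intro e
        have hm : c ∈ t.map (·.1) := pvMemKeys (pvPoss_head h).1
        rw [e] at hm
        exact hnd.1 hm
      have hstep := ih c v R δ hnd.2 h hδ
      rw [pvAddAt_cons, if_neg (fun e => hc e.symm)]
      constructor
      · rw [pvPoss_cons_nonpos hv, hstep.1]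
      · by_cases hn : v0 < 0
        · rw [pvNegs_cons_neg hn, pvNegs_cons_neg hn, hstep.2]
        · rw [pvNegs_cons_nonneg hn, pvNegs_cons_nonneg hn, hstep.2]

lemma pvInnerAdd_keys : ∀ {inner : List (String × Int)} {c c' : String} {a : Int},
    c' ∈ (pvInnerAdd inner c a).map (·.1) → c' = c ∨ c' ∈ inner.map (·.1) := by
  intro inner
  induction inner with
  | nil =>
    intro c c' a h
    simp [pvInnerAdd] at h
    exact Or.inl h
  | cons p t ih =>
    intro c c' a h
    obtain ⟨k0, w⟩ := p
    simp only [pvInnerAdd] at h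
    by_cases hk : k0 = c
    · rw [if_pos hk] at h
      simp only [List.map_cons, List.mem_cons] at h ⊢
      rcases h with h | h
      · exact Or.inl (h.trans hk)
      · exact Or.inr (Or.inr h)
    · rw [if_neg hk] at h
      simp only [List.map_cons, List.mem_cons] at h ⊢
      rcases h with h | h
      · exact Or.inr (Or.inl h)
      · rcases ih h with h' | h'
        · exact Or.inl h'
        · exact Or.inr (Or.inr h')

lemma mem_pvSolAdd : ∀ {sol : List (String × List (String × Int))} {d c : String} {a : Int}
    {q : String × List (String × Int)}, q ∈ pvSolAdd sol d c a →
    q ∈ sol ∨ (q.1 = d ∧ ∀ c' ∈ q.2.map (·.1),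
      c' = c ∨ ∃ inner, (d, inner) ∈ sol ∧ c' ∈ inner.map (·.1)) := by
  intro sol
  induction sol with
  | nil =>
    intro d c a q h
    simp only [pvSolAdd, List.mem_singleton] at h
    subst h
    right
    refine ⟨rfl, ?_⟩
    intro c' hc'
    simp at hc'
    exact Or.inl hc'
  | cons p rest ih =>
    intro d c a q h
    obtain ⟨k, inner⟩ := p
    simp only [pvSolAdd] at h
    by_cases hk : k = d
    · rw [if_pos hk] at h
      rcases List.mem_cons.mp h with h1 | h1
      · subst h1
        right
        refine ⟨hk, ?_⟩
        intro c' hc'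
        rcases pvInnerAdd_keys hc' with h' | h'
        · exact Or.inl h'
        · exact Or.inr ⟨inner, by rw [← hk]; exact List.mem_cons_self, h'⟩
      · exact Or.inl (List.mem_cons_of_mem _ h1)
    · rw [if_neg hk] at h
      rcases List.mem_cons.mp h with h1 | h1
      · subst h1
        exact Or.inl (List.mem_cons_self)
      · rcases ih h1 with h' | ⟨hq1, hin⟩
        · exact Or.inl (List.mem_cons_of_mem _ h')
        · right
          refine ⟨hq1, ?_⟩
          intro c' hc'
          rcases hin c' hc' with h' | ⟨inner', hm, hc2⟩
          · exact Or.inl h'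
          · exact Or.inr ⟨inner', List.mem_cons_of_mem _ hm, hc2⟩

lemma pvInnerAdd_eq_set : ∀ {inner : List (String × Int)} {c : String} (a : Int),
    c ∉ inner.map (·.1) → pvInnerAdd inner c a = pvInnerSet inner c a := by
  intro inner
  induction inner with
  | nil => intro c a _; rfl
  | cons p t ih =>
    intro c a h
    obtain ⟨k0, w⟩ := p
    simp only [List.map_cons, List.mem_cons] at h
    push_neg at h
    simp only [pvInnerAdd, pvInnerSet]
    rw [if_neg (fun e => h.1 e.symm), if_neg (fun e => h.1 e.symm), ih a h.2]

lemma pvSolAdd_eq_set : ∀ {sol : List (String × List (String × Int))} {d c : String} (a : Int),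
    (∀ inner, (d, inner) ∈ sol → c ∉ inner.map (·.1)) →
    pvSolAdd sol d c a = pvSolSet sol d c a := by
  intro sol
  induction sol with
  | nil => intro d c a _; rfl
  | cons p rest ih =>
    intro d c a h
    obtain ⟨k, inner⟩ := p
    simp only [pvSolAdd, pvSolSet]
    by_cases hk : k = d
    · rw [if_pos hk, if_pos hk,
        pvInnerAdd_eq_set a (h inner (by rw [← hk]; exact List.mem_cons_self))]
    · rw [if_neg hk, if_neg hk, ih a (fun i hi => h i (List.mem_cons_of_mem _ hi))]

lemma pvSweep_nil_left (cs : List (String × Int)) (sol : List (String × List (String × Int))) :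
    pvSweep [] cs sol = sol := by
  simp [pvSweep]

lemma pvSweep_nil_right (ds : List (String × Int)) (sol : List (String × List (String × Int))) :
    pvSweep ds [] sol = sol := by
  cases ds with
  | nil => simp [pvSweep]
  | cons p t =>
    obtain ⟨a, b⟩ := p
    simp [pvSweep]

lemma pvSweep_cons (dk ck : String) (dv cv : Int) (ds cs : List (String × Int))
    (sol : List (String × List (String × Int))) :
    pvSweep ((dk, dv) :: ds) ((ck, cv) :: cs) sol =
      if dv ≤ cv then
        (if cv ≤ dv then pvSweep ds cs (pvSolSet sol dk ck (if dv < cv then dv else cv))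
         else pvSweep ds ((ck, cv - (if dv < cv then dv else cv)) :: cs)
                (pvSolSet sol dk ck (if dv < cv then dv else cv)))
      else pvSweep ((dk, dv - (if dv < cv then dv else cv)) :: ds) cs
             (pvSolSet sol dk ck (if dv < cv then dv else cv)) := by
  simp only [pvSweep]

lemma nodup_keys_pvNegs {l : List (String × Int)} (hnd : (l.map (·.1)).Nodup) :
    ((pvNegs l).map (·.1)).Nodup := by
  have he : (pvNegs l).map (·.1) = (l.filter (fun p => p.2 < 0)).map (·.1) := by
    simp [pvNegs, List.map_map]
  rw [he]
  exact (List.filter_sublist.map _).nodup hnd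

lemma nodup_keys_pvPoss {l : List (String × Int)} (hnd : (l.map (·.1)).Nodup) :
    ((pvPoss l).map (·.1)).Nodup :=
  (List.filter_sublist.map _).nodup hnd

lemma pvInv_next {ds' cs' : List (String × Int)} {d c : String} {dvp vc a : Int}
    {sol : List (String × List (String × Int))}
    (hInv : pvInv ((d, dvp) :: ds') ((c, vc) :: cs') sol)
    (hd : d ∉ ds'.map (·.1)) (hc : c ∉ cs'.map (·.1))
    (nds ncs : List (String × Int))
    (hcase : (nds = ds' ∧ (ncs = cs' ∨ ∃ y, ncs = (c, y) :: cs'))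
           ∨ (∃ x, nds = (d, x) :: ds' ∧ ncs = cs')) :
    pvInv nds ncs (pvSolAdd sol d c a) := by
  intro q hq hq1 c' hc' hcs
  rcases hcase with ⟨rfl, hy⟩ | ⟨x, rfl, rfl⟩
  · have hcs2 : c' ∈ ((c, vc) :: cs').map (·.1) := by
      rcases hy with rfl | ⟨y, rfl⟩
      · rw [List.map_cons]
        exact List.mem_cons_of_mem _ hcs
      · rw [List.map_cons] at hcs ⊢
        exact hcs
    rcases mem_pvSolAdd hq with hq' | ⟨hqd, hin⟩
    · exact hInv q hq' (by rw [List.map_cons]; exact List.mem_cons_of_mem _ hq1) c' hc' hcs2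
    · exact hd (hqd ▸ hq1)
  · have hq2 : q.1 ∈ ((d, dvp) :: ds').map (·.1) := by
      rw [List.map_cons] at hq1 ⊢
      exact hq1
    rcases mem_pvSolAdd hq with hq' | ⟨hqd, hin⟩
    · exact hInv q hq' hq2 c' hc' (by rw [List.map_cons]; exact List.mem_cons_of_mem _ hcs)
    · rcases hin c' hc' with rfl | ⟨inner, hmem, hcin⟩
      · exact hc hcs
      · exact hInv (d, inner) hmem (by simp) c' hcin
          (by rw [List.map_cons]; exact List.mem_cons_of_mem _ hcs)

lemma pvLoop_eq_sweep : ∀ (fuel : Nat) (l : List (String × Int))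
    (sol : List (String × List (String × Int))),
    (l.map (·.1)).Nodup →
    pvInv (pvNegs l) (pvPoss l) sol →
    (pvNegs l).length + (pvPoss l).length < fuel →
    pvLoopA fuel l sol = pvSweep (pvNegs l) (pvPoss l) sol := by
  intro fuel
  induction fuel with
  | zero => intro l sol _ _ hlen; omega
  | succ fuel ih =>
    intro l sol hnd hInv hlen
    cases hN : pvNegs l with
    | nil =>
      have hgn : pvGetNegative l = none := by rw [pvGetNegative_eq, hN]; rfl
      cases hP : pvPoss l with
      | nil =>
        have hgp : pvGetPositive l = none := by rw [pvGetPositive_eq, hP]; rfl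
        simp only [pvLoopA, hgp, hgn]
        rw [pvSweep_nil_left]
      | cons pc cs' =>
        have hgp : pvGetPositive l = some pc.1 := by rw [pvGetPositive_eq, hP]; rfl
        simp only [pvLoopA, hgp, hgn]
        rw [pvSweep_nil_left]
    | cons pd ds' =>
      obtain ⟨d, dvp⟩ := pd
      have hgn : pvGetNegative l = some d := by rw [pvGetNegative_eq, hN]; rfl
      cases hP : pvPoss l with
      | nil =>
        have hgp : pvGetPositive l = none := by rw [pvGetPositive_eq, hP]; rfl
        simp only [pvLoopA, hgp, hgn]
        rw [pvSweep_nil_right]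
      | cons pc cs' =>
        obtain ⟨c, vc⟩ := pc
        have hgp : pvGetPositive l = some c := by rw [pvGetPositive_eq, hP]; rfl
        rw [hN, hP] at hInv hlen
        have hfd := pvNegs_head hN
        have hfc := pvPoss_head hP
        have hlookd : pvLookup l d = -dvp := pvLookup_mem hnd hfd.1
        have hlookc : pvLookup l c = vc := pvLookup_mem hnd hfc.1
        have hdpos : (0:Int) < dvp := hfd.2
        have hcpos : (0:Int) < vc := hfc.2
        have hndneg1 : d ∉ ds'.map (·.1) := by
          have h := nodup_keys_pvNegs hnd
          rw [hN, List.map_cons, List.nodup_cons] at h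
          exact h.1
        have hndpos1 : c ∉ cs'.map (·.1) := by
          have h := nodup_keys_pvPoss hnd
          rw [hP, List.map_cons, List.nodup_cons] at h
          exact h.1
        have hsolG : ∀ a : Int, pvSolAdd sol d c a = pvSolSet sol d c a := fun a =>
          pvSolAdd_eq_set a (fun inner hmem hcmem =>
            hInv (d, inner) hmem (by simp) c hcmem (by simp))
        have hif : (if dvp < vc then dvp else vc) = min dvp vc := by
          rcases lt_or_ge dvp vc with h | h
          · rw [if_pos h, min_eq_left h.le]
          · rw [if_neg (not_lt.mpr h), min_eq_right h]
        simp only [pvLoopA, hgp, hgn]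
        rw [hlookd, hlookc, neg_neg, pvSweep_cons, hif]
        simp only [List.length_cons] at hlen
        rcases lt_trichotomy dvp vc with hlt | heq | hgt
        · -- creditor survives, debtor exhausted
          have hma : min dvp vc = dvp := min_eq_left hlt.le
          rw [hma, hsolG dvp]
          rw [if_pos hlt.le, if_neg (not_le.mpr hlt)]
          have hs1 := pvStep_neg l d dvp ds' dvp hnd hN le_rfl
          have hnd1 : ((pvAddAt l d dvp).map (·.1)).Nodup := by
            rw [map_fst_pvAddAt]; exact hnd
          have hP1 : pvPoss (pvAddAt l d dvp) = (c, vc) :: cs' := by rw [hs1.2, hP]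
          have hs2 := pvStep_pos (pvAddAt l d dvp) c vc cs' (-dvp) hnd1 hP1 (by omega)
          have hnegs2 : pvNegs (pvAddAt (pvAddAt l d dvp) c (-dvp)) = ds' := by
            rw [hs2.2, hs1.1, if_neg (lt_irrefl _), List.nil_append]
          have hposs2 : pvPoss (pvAddAt (pvAddAt l d dvp) c (-dvp)) = (c, vc - dvp) :: cs' := by
            rw [hs2.1, if_pos (by omega : (0:Int) < vc + -dvp), List.singleton_append]
            simp [sub_eq_add_neg]
          have hnd2 : ((pvAddAt (pvAddAt l d dvp) c (-dvp)).map (·.1)).Nodup := by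
            rw [map_fst_pvAddAt, map_fst_pvAddAt]; exact hnd
          have hInv2 : pvInv (pvNegs (pvAddAt (pvAddAt l d dvp) c (-dvp)))
              (pvPoss (pvAddAt (pvAddAt l d dvp) c (-dvp))) (pvSolSet sol d c dvp) := by
            rw [hnegs2, hposs2, ← hsolG dvp]
            exact pvInv_next hInv hndneg1 hndpos1 ds' ((c, vc - dvp) :: cs')
              (Or.inl ⟨rfl, Or.inr ⟨vc - dvp, rfl⟩⟩)
          have hlen2 : (pvNegs (pvAddAt (pvAddAt l d dvp) c (-dvp))).length
              + (pvPoss (pvAddAt (pvAddAt l d dvp) c (-dvp))).length < fuel := by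
            rw [hnegs2, hposs2]
            simp only [List.length_cons]
            omega
          rw [← hnegs2, ← hposs2]
          exact ih _ _ hnd2 hInv2 hlen2
        · -- both exhausted
          subst heq
          have hma : min dvp dvp = dvp := min_self _
          rw [hma, hsolG dvp]
          rw [if_pos le_rfl, if_pos le_rfl]
          have hs1 := pvStep_neg l d dvp ds' dvp hnd hN le_rfl
          have hnd1 : ((pvAddAt l d dvp).map (·.1)).Nodup := by
            rw [map_fst_pvAddAt]; exact hnd
          have hP1 : pvPoss (pvAddAt l d dvp) = (c, dvp) :: cs' := by rw [hs1.2, hP]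
          have hs2 := pvStep_pos (pvAddAt l d dvp) c dvp cs' (-dvp) hnd1 hP1 (by omega)
          have hnegs2 : pvNegs (pvAddAt (pvAddAt l d dvp) c (-dvp)) = ds' := by
            rw [hs2.2, hs1.1, if_neg (lt_irrefl _), List.nil_append]
          have hposs2 : pvPoss (pvAddAt (pvAddAt l d dvp) c (-dvp)) = cs' := by
            rw [hs2.1, if_neg (by omega : ¬ (0:Int) < dvp + -dvp), List.nil_append]
          have hnd2 : ((pvAddAt (pvAddAt l d dvp) c (-dvp)).map (·.1)).Nodup := by
            rw [map_fst_pvAddAt, map_fst_pvAddAt]; exact hnd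
          have hInv2 : pvInv (pvNegs (pvAddAt (pvAddAt l d dvp) c (-dvp)))
              (pvPoss (pvAddAt (pvAddAt l d dvp) c (-dvp))) (pvSolSet sol d c dvp) := by
            rw [hnegs2, hposs2, ← hsolG dvp]
            exact pvInv_next hInv hndneg1 hndpos1 ds' cs' (Or.inl ⟨rfl, Or.inl rfl⟩)
          have hlen2 : (pvNegs (pvAddAt (pvAddAt l d dvp) c (-dvp))).length
              + (pvPoss (pvAddAt (pvAddAt l d dvp) c (-dvp))).length < fuel := by
            rw [hnegs2, hposs2]
            omega
          rw [← hnegs2, ← hposs2]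
          exact ih _ _ hnd2 hInv2 hlen2
        · -- debtor survives, creditor exhausted
          have hma : min dvp vc = vc := min_eq_right hgt.le
          rw [hma, hsolG vc]
          rw [if_neg (not_le.mpr hgt)]
          have hs1 := pvStep_neg l d dvp ds' vc hnd hN hgt.le
          have hnd1 : ((pvAddAt l d vc).map (·.1)).Nodup := by
            rw [map_fst_pvAddAt]; exact hnd
          have hP1 : pvPoss (pvAddAt l d vc) = (c, vc) :: cs' := by rw [hs1.2, hP]
          have hs2 := pvStep_pos (pvAddAt l d vc) c vc cs' (-vc) hnd1 hP1 (by omega)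
          have hnegs2 : pvNegs (pvAddAt (pvAddAt l d vc) c (-vc)) = (d, dvp - vc) :: ds' := by
            rw [hs2.2, hs1.1, if_pos hgt, List.singleton_append]
          have hposs2 : pvPoss (pvAddAt (pvAddAt l d vc) c (-vc)) = cs' := by
            rw [hs2.1, if_neg (by omega : ¬ (0:Int) < vc + -vc), List.nil_append]
          have hnd2 : ((pvAddAt (pvAddAt l d vc) c (-vc)).map (·.1)).Nodup := by
            rw [map_fst_pvAddAt, map_fst_pvAddAt]; exact hnd
          have hInv2 : pvInv (pvNegs (pvAddAt (pvAddAt l d vc) c (-vc)))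
              (pvPoss (pvAddAt (pvAddAt l d vc) c (-vc))) (pvSolSet sol d c vc) := by
            rw [hnegs2, hposs2, ← hsolG vc]
            exact pvInv_next hInv hndneg1 hndpos1 ((d, dvp - vc) :: ds') cs'
              (Or.inr ⟨dvp - vc, rfl, rfl⟩)
          have hlen2 : (pvNegs (pvAddAt (pvAddAt l d vc) c (-vc))).length
              + (pvPoss (pvAddAt (pvAddAt l d vc) c (-vc))).length < fuel := by
            rw [hnegs2, hposs2]
            simp only [List.length_cons]
            omega
          rw [← hnegs2, ← hposs2]
          exact ih _ _ hnd2 hInv2 hlen2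

-- ===== VERDICT (by name: the statement is the Claim_ definition above) =====
theorem compute_balance_solution_spec : Claim_equal_compute_balance_solution := by
  intro balance _
  have hnd : (((PySem.Dict.ofList balance : PySem.Dict String Int).items).map (·.1)).Nodup := by
    simpa [PySem.Dict.keys] using
      PySem.Dict.nodup_keys_ofList (κ := String) (ν := Int) balance
  have hInv0 : pvInv (pvNegs (PySem.Dict.ofList balance).items)
      (pvPoss (PySem.Dict.ofList balance).items) [] := by
    intro q hq
    simp at hq
  have hlen : (pvNegs (PySem.Dict.ofList balance).items).length
      + (pvPoss (PySem.Dict.ofList balance).items).length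
      < 2 * ((PySem.Dict.ofList balance : PySem.Dict String Int).items).length + 1 := by
    have h1 := List.length_filter_le (fun p : String × Int => decide (p.2 < 0))
      (PySem.Dict.ofList balance).items
    have h2 := List.length_filter_le (fun p : String × Int => decide (0 < p.2))
      (PySem.Dict.ofList balance).items
    simp only [pvNegs, pvPoss, List.length_map]
    omega
  simpa only [Spec_compute_balance_solution, compute_balance_solution,
    compute_balance_solution_alt] using pvLoop_eq_sweep _ _ _ hnd hInv0 hlen
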